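/- GENERATED by farm/mkstatement.py from design/units.tsv (unit `start_decoder.F5f`) and the assertions of Vorbis/Spec/StartDecoderF5.lean — do not edit.
   THE STATEMENT of the proof unit `start_decoder.F5f`: segment F5f of `start_decoder` (14 instructions; entries 0x11567f;
   exits 0x1156c8; ranges 0x11567f-0x1156c4)
   takes each of its entry assertions to one of its exit assertions (`Vorbis.Spec.StartDecoder.SegF5f`), given the contracts of its callees.
   What the names mean: Vorbis/Spec/Basic.lean (the shared hypotheses), Vorbis/Spec/StartDecoderF5.lean (the assertions). The theorem to prove:
   `theorem start_decoder_F5f_ok : Vorbis.Spec.start_decoder_F5f.Statement`. -/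
import Vorbis.Spec.StartDecoderF5
namespace Vorbis.Spec.start_decoder_F5f
open X86 X86.User Asan

/-- The statement of unit `start_decoder.F5f`. -/
def Statement : Prop :=
  ∀ (Lay : Layout) (_hLay : Lay.hi = 0x1000000) (μ : Microarch) (_hμ : UserX.MicroOK μ) (u₀ : State)
    (_hcode : HasCodeNat Lay u₀ Vorbis.L.start_decoder.entry Vorbis.Code.code_start_decoder.nat Vorbis.L.start_decoder.size)
    (_h_asan_store2_noabort : Asan.SmallCheck Lay μ Vorbis.WayInv (Vorbis.CodeOK u₀) [.rax, .rcx, .rdx] 2 Vorbis.L.__asan_store2_noabort.entry)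
    (_h_asan_load4_noabort : Asan.SmallCheck Lay μ Vorbis.WayInv (Vorbis.CodeOK u₀) [.rax, .rcx, .rdx] 4 Vorbis.L.__asan_load4_noabort.entry),
    Vorbis.Spec.StartDecoder.SegF5f Lay μ u₀

end Vorbis.Spec.start_decoder_F5f
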